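-- pv_equiv track=rewrite | github.com/jxwalker/Trip-Diary | backend/src/services/magazine_pdf_service.py | _determine_photo_aesthetic
-- ===== SOURCE A (Python) =====
-- from typing import Dict, List, Optional, Any
--
-- def _determine_photo_aesthetic(destination: str) -> Dict[str, str]:
--     """Determine photo aesthetic based on destination"""
--     if not destination:
--         return {'style': 'modern', 'filter': 'none'}
--
--     destination_lower = destination.lower()
--
--     if any(place in destination_lower for place in ['paris', 'rome', 'london']):
--         return {'style': 'classic', 'filter': 'warm'}
--     elif any(place in destination_lower for place in ['tokyo', 'seoul', 'singapore']):
--         return {'style': 'modern', 'filter': 'vibrant'}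
--     elif any(place in destination_lower for place in ['bali', 'thailand', 'maldives']):
--         return {'style': 'tropical', 'filter': 'bright'}
--     else:
--         return {'style': 'contemporary', 'filter': 'natural'}
-- ===== SOURCE B (Python) =====
-- GROUPS = (('paris', 'rome', 'london'),
--           ('tokyo', 'seoul', 'singapore'),
--           ('bali', 'thailand', 'maldives'))
--
-- def _determine_photo_aesthetic(destination: str) -> dict:
--     """Single left-to-right scan over the destination: at each position test
--     whether a keyword of each group starts there, accumulating one hit flag
--     per group; then decode the flags."""
--     if not destination:
--         return {'style': 'modern', 'filter': 'none'}
--     dl = destination.lower()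
--     hit = [False, False, False]
--     for i in range(len(dl)):
--         for g in range(3):
--             if not hit[g]:
--                 for kw in GROUPS[g]:
--                     if dl.startswith(kw, i):
--                         hit[g] = True
--                         break
--     if hit[0]:
--         return {'style': 'classic', 'filter': 'warm'}
--     if hit[1]:
--         return {'style': 'modern', 'filter': 'vibrant'}
--     if hit[2]:
--         return {'style': 'tropical', 'filter': 'bright'}
--     return {'style': 'contemporary', 'filter': 'natural'}
-- ===== Notes on version B (the rewrite author's own statement) =====
-- stated objective: alternative
-- what changed: Replaced the if-elif chain of per-group substring membership tests with a single left-to-right scan over the lowercased string's positions that prefix-tests each suffix against the keyword groups, accumulating one hit flag per group, then decodes the flags; no substring primitive is used.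
import Mathlib
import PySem

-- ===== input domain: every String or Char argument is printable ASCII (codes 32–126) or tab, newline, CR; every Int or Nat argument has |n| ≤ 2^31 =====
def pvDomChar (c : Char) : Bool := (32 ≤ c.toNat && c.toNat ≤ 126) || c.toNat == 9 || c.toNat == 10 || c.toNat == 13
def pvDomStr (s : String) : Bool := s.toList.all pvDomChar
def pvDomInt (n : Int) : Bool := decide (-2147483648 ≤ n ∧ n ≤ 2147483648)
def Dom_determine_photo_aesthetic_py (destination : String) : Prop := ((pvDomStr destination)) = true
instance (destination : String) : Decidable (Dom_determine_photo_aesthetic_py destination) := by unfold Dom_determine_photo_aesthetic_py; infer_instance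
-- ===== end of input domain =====

-- B replaces A's if-elif chain of substring tests with one left-to-right scan over the
-- string's positions accumulating a hit flag per keyword group (objective: alternative).

-- ===== PORT A =====
def determine_photo_aesthetic_py (destination : String) : List (String × String) :=
  if destination = "" then [("style", "modern"), ("filter", "none")]
  else
    let destination_lower := PySem.Str.lower destination
    if ["paris", "rome", "london"].any (fun place => PySem.Str.isIn place destination_lower) then
      [("style", "classic"), ("filter", "warm")]
    else if ["tokyo", "seoul", "singapore"].any (fun place => PySem.Str.isIn place destination_lower) then
      [("style", "modern"), ("filter", "vibrant")]
    else if ["bali", "thailand", "maldives"].any (fun place => PySem.Str.isIn place destination_lower) then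
      [("style", "tropical"), ("filter", "bright")]
    else
      [("style", "contemporary"), ("filter", "natural")]

-- ===== PORT B =====
def pvG1 : List (List Char) := [['p','a','r','i','s'], ['r','o','m','e'], ['l','o','n','d','o','n']]
def pvG2 : List (List Char) := [['t','o','k','y','o'], ['s','e','o','u','l'], ['s','i','n','g','a','p','o','r','e']]
def pvG3 : List (List Char) := [['b','a','l','i'], ['t','h','a','i','l','a','n','d'], ['m','a','l','d','i','v','e','s']]

-- one group's check at one position: does some keyword start at this suffix?
def pvHit (g : List (List Char)) (s : List Char) : Bool := g.any (fun kw => kw.isPrefixOf s)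

-- the scan over positions (suffixes), carrying the three hit flags; `if a then a else …`
-- transliterates Source B's `if not hit[g]: … break` guard
def pvScan : List Char → Bool × Bool × Bool → Bool × Bool × Bool
  | [], acc => acc
  | c :: rest, (a, b, d) =>
      pvScan rest
        ((if a then a else pvHit pvG1 (c :: rest)),
         (if b then b else pvHit pvG2 (c :: rest)),
         (if d then d else pvHit pvG3 (c :: rest)))

def determine_photo_aesthetic_py_alt (destination : String) : List (String × String) :=
  if destination = "" then [("style", "modern"), ("filter", "none")]
  else
    let dl := (PySem.Str.lower destination).toList
    let hit := pvScan dl (false, false, false)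
    if hit.1 then [("style", "classic"), ("filter", "warm")]
    else if hit.2.1 then [("style", "modern"), ("filter", "vibrant")]
    else if hit.2.2 then [("style", "tropical"), ("filter", "bright")]
    else [("style", "contemporary"), ("filter", "natural")]

-- ===== PRECONDITION & SPEC =====
def Spec_determine_photo_aesthetic_py (destination : String) (out : List (String × String)) : Prop := out = determine_photo_aesthetic_py_alt destination
instance (destination : String) (out : List (String × String)) : Decidable (Spec_determine_photo_aesthetic_py destination out) := by unfold Spec_determine_photo_aesthetic_py; infer_instance

-- ===== CLAIM =====
def Claim_equal_determine_photo_aesthetic_py : Prop := ∀ (destination : String), Dom_determine_photo_aesthetic_py destination → Spec_determine_photo_aesthetic_py destination (determine_photo_aesthetic_py destination)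

-- ===== LEMMAS AND PROOFS =====

-- the flags after the scan are the ors of the group hits over all (proper) suffixes
def pvAny (g : List (List Char)) : List Char → Bool
  | [] => false
  | c :: rest => pvHit g (c :: rest) || pvAny g rest

lemma pvScan_eq (s : List Char) : ∀ a b d, pvScan s (a, b, d) =
    (a || pvAny pvG1 s, b || pvAny pvG2 s, d || pvAny pvG3 s) := by
  induction s with
  | nil => intro a b d; simp [pvScan, pvAny]
  | cons c rest ih =>
      intro a b d
      simp only [pvScan, pvAny, ih]
      cases a <;> cases b <;> cases d <;> simp

lemma pvAny_iff (g : List (List Char)) (s : List Char) :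
    pvAny g s = true ↔ ∃ j, j < s.length ∧ pvHit g (s.drop j) = true := by
  induction s with
  | nil => simp [pvAny]
  | cons c rest ih =>
      simp only [pvAny, Bool.or_eq_true, ih]
      constructor
      · rintro (h | ⟨j, hj, h⟩)
        · exact ⟨0, by simp, h⟩
        · exact ⟨j + 1, by simpa using hj, by simpa using h⟩
      · rintro ⟨j, hj, h⟩
        cases j with
        | zero => exact Or.inl h
        | succ j => exact Or.inr ⟨j, by simpa using hj, by simpa using h⟩

-- for a group of nonempty keywords, the scanned flag coincides with A's `any(kw in s)`
lemma pvAny_eq_any_isIn (g : List (List Char)) (hg : ∀ kw ∈ g, kw ≠ []) (s : List Char) :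
    pvAny g s = g.any (fun kw => PySem.Chars.isIn kw s) := by
  rcases hb : g.any (fun kw => PySem.Chars.isIn kw s) with _ | _
  · simp only [List.any_eq_false] at hb
    rcases ha : pvAny g s with _ | _
    · rfl
    · exfalso
      rcases (pvAny_iff g s).1 ha with ⟨j, _, hhit⟩
      rcases List.any_eq_true.1 hhit with ⟨kw, hkw, hpre⟩
      have hin : PySem.Chars.isIn kw s = true :=
        (PySem.Chars.exists_prefix_drop_iff_isIn kw s).1 ⟨j, List.isPrefixOf_iff_prefix.1 hpre⟩
      exact hb kw hkw hin
  · rcases List.any_eq_true.1 hb with ⟨kw, hkw, hin⟩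
    rcases (PySem.Chars.exists_prefix_drop_iff_isIn kw s).2 hin with ⟨j, hpre⟩
    have hjlt : j < s.length := by
      by_contra hle
      rw [not_lt] at hle
      rw [List.drop_eq_nil_of_le hle] at hpre
      exact hg kw hkw (List.prefix_nil.1 hpre)
    exact (pvAny_iff g s).2 ⟨j, hjlt, List.any_eq_true.2 ⟨kw, hkw, List.isPrefixOf_iff_prefix.2 hpre⟩⟩

-- A's group test equals B's scanned flag, per group (strings → char lists)
lemma groupA_eq (places : List String) (g : List (List Char))
    (hmap : places.map String.toList = g) (hg : ∀ kw ∈ g, kw ≠ []) (dl : String) :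
    places.any (fun place => PySem.Str.isIn place dl) = pvAny g dl.toList := by
  rw [pvAny_eq_any_isIn g hg, ← hmap, List.any_map]
  have hpt : ∀ place : String, PySem.Str.isIn place dl = PySem.Chars.isIn place.toList dl.toList := by
    intro place
    rcases h : PySem.Chars.isIn place.toList dl.toList with _ | _
    · rw [PySem.Chars.isIn_eq_false_iff] at h
      exact Bool.eq_false_iff.2 fun hc => h ((PySem.Str.isIn_iff_infix place dl).1 hc)
    · exact (PySem.Str.isIn_iff_infix place dl).2 ((PySem.Chars.isIn_iff_infix place.toList dl.toList).1 h)
  simp only [hpt]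
  rfl

-- ===== VERDICT =====
theorem determine_photo_aesthetic_py_spec : Claim_equal_determine_photo_aesthetic_py := by
  intro destination _
  unfold Spec_determine_photo_aesthetic_py determine_photo_aesthetic_py determine_photo_aesthetic_py_alt
  by_cases hempty : destination = ""
  · simp [hempty]
  · simp only [hempty, if_false]
    have h1 := groupA_eq ["paris", "rome", "london"] pvG1 (by decide) (by decide)
      (PySem.Str.lower destination)
    have h2 := groupA_eq ["tokyo", "seoul", "singapore"] pvG2 (by decide) (by decide)
      (PySem.Str.lower destination)
    have h3 := groupA_eq ["bali", "thailand", "maldives"] pvG3 (by decide) (by decide)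
      (PySem.Str.lower destination)
    simp only [pvScan_eq, Bool.false_or, h1, h2, h3]
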